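-- pv_equiv track=rewrite | github.com/moosermail/moosermail | inbox.py | _rewrap_spans
-- ===== SOURCE A (Python) =====
-- def _rewrap_spans(spans, wrapped):
--     """
--     Re-map (text, attr) spans onto word-wrapped lines.
--     Builds a flat (char, attr) list then slices by wrapped-line length,
--     so each wrapped line gets the exact characters that belong to it.
--     """
--     flat = []
--     for seg, attr in spans:
--         for ch in seg:
--             flat.append((ch, attr))
--
--     output = []
--     pos    = 0
--     for wline in wrapped:
--         seg_chars = flat[pos: pos + len(wline)]
--         pos += len(wline)
--         # textwrap collapses the space between lines — skip it
--         if pos < len(flat) and flat[pos][0] == ' ':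
--             pos += 1
--
--         if not seg_chars:
--             output.append([("", 0)])
--             continue
--         # Re-group consecutive same-attr chars into span tuples
--         line_out = []
--         cur_seg, cur_attr = "", seg_chars[0][1]
--         for ch, attr in seg_chars:
--             if attr == cur_attr:
--                 cur_seg += ch
--             else:
--                 line_out.append((cur_seg, cur_attr))
--                 cur_seg, cur_attr = ch, attr
--         if cur_seg:
--             line_out.append((cur_seg, cur_attr))
--         output.append(line_out)
--     return output
-- ===== SOURCE B (Python) =====
-- def _rewrap_spans(spans, wrapped):
--     """
--     Re-map (text, attr) spans onto word-wrapped lines by walking the spans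
--     with a cursor (list of remaining (text, attr) pieces) instead of
--     building a flat per-character list.
--     """
--     rem = [(seg, attr) for seg, attr in spans if seg]
--     output = []
--     for wline in wrapped:
--         need = len(wline)
--         pieces = []
--         while need and rem:
--             seg, attr = rem[0]
--             take = min(need, len(seg))
--             if pieces and pieces[-1][1] == attr:
--                 pieces[-1] = (pieces[-1][0] + seg[:take], attr)
--             else:
--                 pieces.append((seg[:take], attr))
--             need -= take
--             if take == len(seg):
--                 rem.pop(0)
--             else:
--                 rem[0] = (seg[take:], attr)
--         # textwrap collapses the space between lines — skip it
--         if rem and rem[0][0][0] == ' ':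
--             seg, attr = rem[0]
--             if len(seg) == 1:
--                 rem.pop(0)
--             else:
--                 rem[0] = (seg[1:], attr)
--         output.append(pieces if pieces else [("", 0)])
--     return output
-- ===== Notes on version B (the rewrite author's own statement) =====
-- stated objective: alternative
-- what changed: B walks the spans with a cursor of remaining (text, attr) pieces, consuming whole substrings per wrapped line and coalescing same-attr pieces on the fly, instead of exploding the spans into a flat per-character (char, attr) list and re-grouping each sliced line character by character.
import Mathlib
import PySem

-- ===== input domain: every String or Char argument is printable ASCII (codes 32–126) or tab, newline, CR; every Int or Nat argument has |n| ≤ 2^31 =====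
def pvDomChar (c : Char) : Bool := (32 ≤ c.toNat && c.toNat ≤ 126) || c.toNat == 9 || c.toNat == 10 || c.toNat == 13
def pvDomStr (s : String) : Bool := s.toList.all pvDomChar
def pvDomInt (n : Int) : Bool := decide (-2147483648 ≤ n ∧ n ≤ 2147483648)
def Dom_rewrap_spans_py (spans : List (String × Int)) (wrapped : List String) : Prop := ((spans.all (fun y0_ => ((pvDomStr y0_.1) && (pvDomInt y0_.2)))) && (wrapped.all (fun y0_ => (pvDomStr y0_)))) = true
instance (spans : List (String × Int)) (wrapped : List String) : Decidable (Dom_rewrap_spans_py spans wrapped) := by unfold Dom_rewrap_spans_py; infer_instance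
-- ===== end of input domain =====

-- B replaces A's flat per-character (char, attr) list with a cursor over the spans,
-- consuming whole substrings per wrapped line; same return value (alternative, not faster).

-- ===== PORT A =====
-- A's per-line loop body (literal; pos stays a Nat: Python's pos is a nonnegative int
-- throughout, so flat[pos:pos+n] is exactly (flat.drop pos).take n and flat[pos] is getD).
def pvStepLineA (flat : List (Char × Int)) (st : List (List (String × Int)) × Nat) (wline : String) :
    List (List (String × Int)) × Nat :=
  let n := wline.toList.length
  let seg_chars := (flat.drop st.2).take n
  let pos := st.2 + n
  let pos := if pos < flat.length ∧ (flat.getD pos (' ', 0)).1 = ' ' then pos + 1 else pos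
  match seg_chars with
  | [] => (st.1 ++ [[("", 0)]], pos)
  | (_, a0) :: _ =>
    -- cur_seg is kept as a List Char (Python string concatenation char by char)
    let fin := seg_chars.foldl
      (fun (acc : List (List Char × Int) × List Char × Int) (p : Char × Int) =>
        if p.2 = acc.2.2 then (acc.1, acc.2.1 ++ [p.1], acc.2.2)
        else (acc.1 ++ [(acc.2.1, acc.2.2)], [p.1], p.2)) ([], [], a0)
    let line_out := fin.1 ++ (if fin.2.1 ≠ [] then [(fin.2.1, fin.2.2)] else [])
    (st.1 ++ [line_out.map (fun q => (String.mk q.1, q.2))], pos)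

def rewrap_spans_py (spans : List (String × Int)) (wrapped : List String) : List (List (String × Int)) :=
  let flat : List (Char × Int) :=
    spans.foldl (fun acc p => p.1.toList.foldl (fun acc ch => acc ++ [(ch, p.2)]) acc) []
  (wrapped.foldl (pvStepLineA flat) ([], 0)).1

-- ===== PORT B =====
-- append (or merge into the last same-attr piece) a substring; pieces kept in reverse order
def pvPush (rp : List (List Char × Int)) (s : List Char) (a : Int) : List (List Char × Int) :=
  match rp with
  | (t, b) :: rest => if b = a then (t ++ s, a) :: rest else (s, a) :: (t, b) :: rest
  | [] => [(s, a)]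

-- the 'while need and rem' loop of Source B
def pvConsume (need : Nat) (rem : List (List Char × Int)) (rp : List (List Char × Int)) :
    List (List Char × Int) × List (List Char × Int) :=
  match rem with
  | [] => (rp, [])
  | (seg, a) :: rest =>
    if need = 0 then (rp, (seg, a) :: rest)
    else
      let tk := min need seg.length
      let rp' := pvPush rp (seg.take tk) a
      if tk = seg.length then pvConsume (need - tk) rest rp'
      else (rp', (seg.drop tk, a) :: rest)

-- skip the collapsed inter-line space at the cursor
def pvSkipSpace (rem : List (List Char × Int)) : List (List Char × Int) :=
  match rem with
  | (c :: seg, a) :: rest =>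
    if c = ' ' then (if seg = [] then rest else (seg, a) :: rest) else (c :: seg, a) :: rest
  | rem => rem

def pvStepLineB (st : List (List (String × Int)) × List (List Char × Int)) (wline : String) :
    List (List (String × Int)) × List (List Char × Int) :=
  let r := pvConsume wline.toList.length st.2 []
  let line := if r.1 = [] then [("", 0)] else r.1.reverse.map (fun q => (String.mk q.1, q.2))
  (st.1 ++ [line], pvSkipSpace r.2)

def rewrap_spans_py_alt (spans : List (String × Int)) (wrapped : List String) : List (List (String × Int)) :=
  let init : List (List Char × Int) :=
    spans.filterMap (fun p => if p.1 = "" then none else some (p.1.toList, p.2))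
  (wrapped.foldl pvStepLineB ([], init)).1

-- ===== PRECONDITION & SPEC =====
def Spec_rewrap_spans_py (spans : List (String × Int)) (wrapped : List String) (out : List (List (String × Int))) : Prop := out = rewrap_spans_py_alt spans wrapped
instance (spans : List (String × Int)) (wrapped : List String) (out : List (List (String × Int))) : Decidable (Spec_rewrap_spans_py spans wrapped out) := by unfold Spec_rewrap_spans_py; infer_instance

-- ===== CLAIM (what is proved, stated in full; the proofs are below) =====
def Claim_equal_rewrap_spans_py : Prop := ∀ (spans : List (String × Int)) (wrapped : List String), Dom_rewrap_spans_py spans wrapped → Spec_rewrap_spans_py spans wrapped (rewrap_spans_py spans wrapped)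

-- ===== LEMMAS AND PROOFS =====

-- the character stream still to be consumed by B's cursor
def pvFlat (rem : List (List Char × Int)) : List (Char × Int) :=
  rem.flatMap (fun p => p.1.map (fun c => (c, p.2)))

-- cursor well-formedness: no empty segments
def pvWF (rem : List (List Char × Int)) : Prop := ∀ p ∈ rem, p.1 ≠ []

def pvCharPush (rp : List (List Char × Int)) (p : Char × Int) : List (List Char × Int) :=
  pvPush rp [p.1] p.2

theorem pvFlat_cons (s : List Char) (a : Int) (rest : List (List Char × Int)) :
    pvFlat ((s, a) :: rest) = s.map (fun c => (c, a)) ++ pvFlat rest := rfl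

theorem pvPush_top (s : List Char) (t : List Char) (a : Int) (rest : List (List Char × Int)) :
    (s.map (fun c => (c, a))).foldl pvCharPush ((t, a) :: rest) = (t ++ s, a) :: rest := by
  induction s generalizing t with
  | nil => simp
  | cons c cs ih =>
    simp only [List.map_cons, List.foldl_cons]
    have h1 : pvCharPush ((t, a) :: rest) (c, a) = (t ++ [c], a) :: rest := by
      simp [pvCharPush, pvPush]
    rw [h1, ih (t ++ [c])]
    simp

theorem pvPush_eq_foldl (s : List Char) (a : Int) (rp : List (List Char × Int)) (hs : s ≠ []) :
    pvPush rp s a = (s.map (fun c => (c, a))).foldl pvCharPush rp := by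
  cases s with
  | nil => exact absurd rfl hs
  | cons c cs =>
    simp only [List.map_cons, List.foldl_cons]
    cases rp with
    | nil =>
      have h1 : pvCharPush [] (c, a) = [([c], a)] := rfl
      rw [h1, pvPush_top]
      simp [pvPush]
    | cons hd rest =>
      obtain ⟨t, b⟩ := hd
      by_cases hb : b = a
      · subst hb
        have h1 : pvCharPush ((t, b) :: rest) (c, b) = (t ++ [c], b) :: rest := by
          simp [pvCharPush, pvPush]
        rw [h1, pvPush_top]
        simp [pvPush]
      · have h1 : pvCharPush ((t, b) :: rest) (c, a) = ([c], a) :: (t, b) :: rest := by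
          simp [pvCharPush, pvPush, hb]
        rw [h1, pvPush_top]
        simp [pvPush, hb]

theorem pvConsume_spec (rem : List (List Char × Int)) :
    ∀ (need : Nat) (rp : List (List Char × Int)), pvWF rem →
    (pvConsume need rem rp).1 = ((pvFlat rem).take need).foldl pvCharPush rp ∧
    pvFlat (pvConsume need rem rp).2 = (pvFlat rem).drop need ∧
    pvWF (pvConsume need rem rp).2 := by
  induction rem with
  | nil =>
    intro need rp _
    simp [pvConsume, pvFlat, pvWF]
  | cons hd rest ih =>
    intro need rp hwf
    obtain ⟨seg, a⟩ := hd
    have hseg : seg ≠ [] := hwf (seg, a) (by simp)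
    have hwfr : pvWF rest := fun p hp => hwf p (List.mem_cons_of_mem _ hp)
    by_cases h0 : need = 0
    · subst h0
      simp only [pvConsume, if_pos rfl]
      exact ⟨by simp, by simp, hwf⟩
    · simp only [pvConsume, if_neg h0]
      by_cases hle : min need seg.length = seg.length
      · simp only [if_pos hle]
        have hlen : seg.length ≤ need := by omega
        obtain ⟨h1, h2, h3⟩ := ih (need - min need seg.length) (pvPush rp (seg.take (min need seg.length)) a) hwfr
        refine ⟨?_, ?_, h3⟩
        · rw [h1, hle, List.take_length, pvFlat_cons, List.take_append, List.foldl_append,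
            List.take_of_length_le (show (seg.map (fun c => (c, a))).length ≤ need by
              simpa using hlen),
            pvPush_eq_foldl _ _ _ hseg]
          simp
        · rw [h2, hle, pvFlat_cons, List.drop_append,
            List.drop_of_length_le (show (seg.map (fun c => (c, a))).length ≤ need by
              simpa using hlen)]
          simp
      · simp only [if_neg hle]
        have hlt : need < seg.length := by omega
        have hmin : min need seg.length = need := Nat.min_eq_left (Nat.le_of_lt hlt)
        rw [hmin]
        have htk : seg.take need ≠ [] := by
          simp [List.take_eq_nil_iff, h0, hseg]
        refine ⟨?_, ?_, ?_⟩
        · rw [pvFlat_cons, List.take_append,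
            pvPush_eq_foldl _ _ _ htk]
          have hz : need - (seg.map (fun c => (c, a))).length = 0 := by simp; omega
          rw [hz, List.take_zero, List.append_nil, List.map_take]
        · rw [pvFlat_cons, pvFlat_cons, List.drop_append]
          have hz : need - (seg.map (fun c => (c, a))).length = 0 := by simp; omega
          rw [hz, List.drop_zero, List.map_drop]
        · intro p hp
          rcases List.mem_cons.mp hp with h | h
          · subst h
            simp only [ne_eq, List.drop_eq_nil_iff]
            omega
          · exact hwfr p h

def pvFinish (st : List (List Char × Int) × List Char × Int) : List (List Char × Int) :=
  st.1 ++ (if st.2.1 ≠ [] then [(st.2.1, st.2.2)] else [])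

def pvStepA (acc : List (List Char × Int) × List Char × Int) (p : Char × Int) :
    List (List Char × Int) × List Char × Int :=
  if p.2 = acc.2.2 then (acc.1, acc.2.1 ++ [p.1], acc.2.2)
  else (acc.1 ++ [(acc.2.1, acc.2.2)], [p.1], p.2)

theorem pvRegroup_rev (sc : List (Char × Int)) :
    ∀ (lo : List (List Char × Int)) (cs : List Char) (ca : Int), cs ≠ [] →
    pvFinish (sc.foldl pvStepA (lo, cs, ca)) = (sc.foldl pvCharPush ((cs, ca) :: lo.reverse)).reverse := by
  induction sc with
  | nil =>
    intro lo cs ca hcs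
    simp [pvFinish, hcs]
  | cons p tl ih =>
    intro lo cs ca hcs
    obtain ⟨c, a⟩ := p
    by_cases ha : a = ca
    · subst ha
      have h1 : pvStepA (lo, cs, a) (c, a) = (lo, cs ++ [c], a) := by simp [pvStepA]
      have h2 : pvCharPush ((cs, a) :: lo.reverse) (c, a) = (cs ++ [c], a) :: lo.reverse := by
        simp [pvCharPush, pvPush]
      simp only [List.foldl_cons, h1, h2]
      exact ih lo (cs ++ [c]) a (by simp)
    · have h1 : pvStepA (lo, cs, ca) (c, a) = (lo ++ [(cs, ca)], [c], a) := by simp [pvStepA, ha]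
      have h2 : pvCharPush ((cs, ca) :: lo.reverse) (c, a) = ([c], a) :: (cs, ca) :: lo.reverse := by
        simp only [pvCharPush, pvPush]
        rw [if_neg (by omega)]
      simp only [List.foldl_cons, h1, h2]
      have := ih (lo ++ [(cs, ca)]) [c] a (by simp)
      simpa using this

theorem pvCharPush_ne_nil (rp : List (List Char × Int)) (p : Char × Int) : pvCharPush rp p ≠ [] := by
  obtain ⟨c, a⟩ := p
  cases rp with
  | nil => simp [pvCharPush, pvPush]
  | cons hd rest =>
    obtain ⟨t, b⟩ := hd
    by_cases hb : b = a <;> simp [pvCharPush, pvPush, hb]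

theorem pvFoldl_charPush_ne_nil (sc : List (Char × Int)) :
    ∀ rp, rp ≠ [] → sc.foldl pvCharPush rp ≠ [] := by
  induction sc with
  | nil => intro rp h; simpa using h
  | cons p tl ih => intro rp _; exact ih _ (pvCharPush_ne_nil rp p)

-- per-line: A's seg_chars regrouping equals B's consume, and the cursors stay in sync
theorem pvLine_eq (rem : List (List Char × Int)) (n : Nat) (hwf : pvWF rem) :
    (if ((pvConsume n rem []).1 = []) then [("", (0:Int))]
      else (pvConsume n rem []).1.reverse.map (fun q => (String.mk q.1, q.2))) =
    (match ((pvFlat rem).take n) with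
      | [] => [(("" : String), (0:Int))]
      | (_, a0) :: _ =>
        (pvFinish (((pvFlat rem).take n).foldl pvStepA ([], [], a0))).map (fun q => (String.mk q.1, q.2))) := by
  obtain ⟨h1, _, _⟩ := pvConsume_spec rem n [] hwf
  rw [h1]
  cases hsc : (pvFlat rem).take n with
  | nil => simp
  | cons p tl =>
    obtain ⟨c0, a0⟩ := p
    have hstep : pvStepA ([], [], a0) (c0, a0) = ([], [c0], a0) := by simp [pvStepA]
    have hpush : pvCharPush [] (c0, a0) = [([c0], a0)] := rfl
    simp only [List.foldl_cons, hstep, hpush]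
    have hne : tl.foldl pvCharPush [([c0], a0)] ≠ [] := pvFoldl_charPush_ne_nil tl _ (by simp)
    rw [if_neg hne]
    have := pvRegroup_rev tl [] [c0] a0 (by simp)
    simp only [List.reverse_nil] at this
    rw [this, List.map_reverse]

-- the skip-space step seen through pvFlat
theorem pvSkipSpace_spec (rem : List (List Char × Int)) (hwf : pvWF rem) :
    pvWF (pvSkipSpace rem) ∧
    pvFlat (pvSkipSpace rem) =
      (match pvFlat rem with
        | [] => ([] : List (Char × Int))
        | (c, _) :: tl => if c = ' ' then tl else pvFlat rem) := by
  cases rem with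
  | nil => exact ⟨hwf, by simp [pvSkipSpace, pvFlat]⟩
  | cons hd rest =>
    obtain ⟨seg, a⟩ := hd
    cases seg with
    | nil => exact absurd rfl (hwf ([], a) (by simp))
    | cons c cs =>
      have hwfr : pvWF rest := fun p hp => hwf p (List.mem_cons_of_mem _ hp)
      by_cases hc : c = ' '
      · subst hc
        by_cases hcs : cs = []
        · subst hcs
          refine ⟨hwfr, ?_⟩
          simp [pvSkipSpace, pvFlat_cons]
        · refine ⟨?_, ?_⟩
          · intro p hp
            simp only [pvSkipSpace, if_pos rfl, if_neg hcs] at hp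
            rcases List.mem_cons.mp hp with h | h
            · subst h; exact hcs
            · exact hwfr p h
          · simp [pvSkipSpace, hcs, pvFlat_cons]
      · refine ⟨?_, ?_⟩
        · simpa [pvSkipSpace, hc] using hwf
        · simp [pvSkipSpace, hc, pvFlat_cons]

-- main loop: the two folds agree line by line
theorem pvLoop_eq (flat : List (Char × Int)) (ws : List String) :
    ∀ (out : List (List (String × Int))) (pos : Nat) (rem : List (List Char × Int)),
    pvWF rem → pvFlat rem = flat.drop pos →
    (ws.foldl (pvStepLineA flat) (out, pos)).1 = (ws.foldl pvStepLineB (out, rem)).1 := by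
  induction ws with
  | nil => intro out pos rem _ _; rfl
  | cons w ws ih =>
    intro out pos rem hwf hinv
    simp only [List.foldl_cons]
    have hs : (flat.drop pos).take w.toList.length = (pvFlat rem).take w.toList.length := by
      rw [hinv]
    obtain ⟨_, h2, h3⟩ := pvConsume_spec rem w.toList.length [] hwf
    have hdrop : pvFlat (pvConsume w.toList.length rem []).2 = flat.drop (pos + w.toList.length) := by
      rw [h2, hinv, List.drop_drop]
    obtain ⟨hwf', hflat'⟩ := pvSkipSpace_spec (pvConsume w.toList.length rem []).2 h3
    have hinv' : pvFlat (pvSkipSpace (pvConsume w.toList.length rem []).2) =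
        flat.drop (if pos + w.toList.length < flat.length ∧
            (flat.getD (pos + w.toList.length) (' ', 0)).1 = ' '
          then pos + w.toList.length + 1 else pos + w.toList.length) := by
      rw [hflat', hdrop]
      cases hfd : flat.drop (pos + w.toList.length) with
      | nil =>
        have hge : flat.length ≤ pos + w.toList.length := List.drop_eq_nil_iff.mp hfd
        rw [if_neg (fun hc => absurd hc.1 (not_lt.mpr hge)), hfd]
      | cons p tl =>
        obtain ⟨c, b⟩ := p
        have hlt : pos + w.toList.length < flat.length := by
          by_contra h
          rw [List.drop_eq_nil_iff.mpr (by omega)] at hfd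
          exact (List.cons_ne_nil _ _) hfd.symm
        have hget : flat.getD (pos + w.toList.length) (' ', 0) = (c, b) := by
          have h1 : (flat.drop (pos + w.toList.length)).head? = some (c, b) := by rw [hfd]; rfl
          rw [List.head?_drop] at h1
          rw [List.getD_eq_getElem?_getD, h1]
          rfl
        by_cases hc : c = ' '
        · rw [if_pos ⟨hlt, by rw [hget, hc]⟩]
          have hdr : flat.drop (pos + w.toList.length + 1) = tl := by
            have h := congrArg (List.drop 1) hfd
            rw [List.drop_drop] at h
            exact h
          rw [hdr]
          simp [hc]
        · rw [if_neg (fun hcnd => hc (by rw [hget] at hcnd; exact hcnd.2)), hfd]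
          simp [hc]
    have hline := pvLine_eq rem w.toList.length hwf
    have hA : pvStepLineA flat (out, pos) w =
        (out ++ [(match ((pvFlat rem).take w.toList.length) with
          | [] => [(("" : String), (0:Int))]
          | (_, a0) :: _ =>
            (pvFinish (((pvFlat rem).take w.toList.length).foldl pvStepA ([], [], a0))).map
              (fun q => (String.mk q.1, q.2)))],
         (if pos + w.toList.length < flat.length ∧
            (flat.getD (pos + w.toList.length) (' ', 0)).1 = ' '
          then pos + w.toList.length + 1 else pos + w.toList.length)) := by
      simp only [pvStepLineA, hs]
      cases hsc : (pvFlat rem).take w.toList.length with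
      | nil => rfl
      | cons p tl =>
        obtain ⟨c0, a0⟩ := p
        rfl
    have hB : pvStepLineB (out, rem) w =
        (out ++ [(if ((pvConsume w.toList.length rem []).1 = []) then [("", (0:Int))]
          else (pvConsume w.toList.length rem []).1.reverse.map (fun q => (String.mk q.1, q.2)))],
         pvSkipSpace (pvConsume w.toList.length rem []).2) := rfl
    rw [hA, hB, ← hline]
    exact ih _ _ _ hwf' hinv'

-- A's flat list equals the stream of B's initial cursor
theorem pvFlat_init (spans : List (String × Int)) :
    pvFlat (spans.filterMap (fun p => if p.1 = "" then none else some (p.1.toList, p.2))) =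
    spans.foldl (fun acc p => p.1.toList.foldl (fun acc ch => acc ++ [(ch, p.2)]) acc) [] := by
  have hgen : ∀ (l : List (String × Int)) (acc : List (Char × Int)),
      l.foldl (fun acc p => p.1.toList.foldl (fun acc ch => acc ++ [(ch, p.2)]) acc) acc =
      acc ++ pvFlat (l.filterMap (fun p => if p.1 = "" then none else some (p.1.toList, p.2))) := by
    intro l
    induction l with
    | nil => intro acc; simp [pvFlat]
    | cons hd tl ih =>
      intro acc
      obtain ⟨s, a⟩ := hd
      simp only [List.foldl_cons]
      have hinner : s.toList.foldl (fun acc ch => acc ++ [(ch, a)]) acc =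
          acc ++ s.toList.map (fun c => (c, a)) := by
        induction s.toList generalizing acc with
        | nil => simp
        | cons c cs ih2 => simp [ih2]
      rw [hinner, ih]
      by_cases hs : s = ""
      · subst hs
        simp
      · rw [show List.filterMap (fun p => if p.1 = "" then none else some (p.1.toList, p.2))
            ((s, a) :: tl) = (s.toList, a) ::
            List.filterMap (fun p => if p.1 = "" then none else some (p.1.toList, p.2)) tl from by
          rw [List.filterMap_cons]
          simp [hs]]
        rw [pvFlat_cons, List.append_assoc]
  rw [hgen]
  simp

theorem pvWF_init (spans : List (String × Int)) :
    pvWF (spans.filterMap (fun p => if p.1 = "" then none else some (p.1.toList, p.2))) := by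
  intro p hp
  rcases List.mem_filterMap.mp hp with ⟨q, _, hq⟩
  by_cases h : q.1 = ""
  · rw [if_pos h] at hq
    simp at hq
  · rw [if_neg h] at hq
    obtain rfl := Option.some.inj hq
    simpa using h

-- ===== VERDICT (by name: the statement is the Claim_ definition above) =====
theorem rewrap_spans_py_spec : Claim_equal_rewrap_spans_py := by
  intro spans wrapped _
  unfold Spec_rewrap_spans_py rewrap_spans_py rewrap_spans_py_alt
  exact pvLoop_eq _ wrapped [] 0 _ (pvWF_init spans) (by rw [pvFlat_init]; simp)
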